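-- pv_equiv track=rewrite | github.com/yamauchiyuhei/ChlamyDesign | src/api/services/sequence_analysis.py | _mountain_from_structure
-- ===== SOURCE A (Python) =====
-- def _mountain_from_structure(structure: str) -> list[int]:
--     """Calculate mountain plot data (nesting depth) from dot-bracket string."""
--     depths = []
--     depth = 0
--     for c in structure:
--         if c == "(":
--             depth += 1
--         depths.append(depth)
--         if c == ")":
--             depth -= 1
--     return depths
-- ===== SOURCE B (Python) =====
-- def _mountain_from_structure(structure: str) -> list[int]:
--     """Mountain plot by divide and conquer: split the string in half, solve
--     each half independently (the depth profile is translation-invariant), and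
--     shift the right half's profile by the left half's net bracket balance.
--     A single character contributes [1] for '(' and [0] otherwise (a ')' records
--     the depth before its decrement)."""
--     n = len(structure)
--     if n == 0:
--         return []
--     if n == 1:
--         return [1] if structure == "(" else [0]
--     mid = n // 2
--     left, right = structure[:mid], structure[mid:]
--     shift = left.count("(") - left.count(")")
--     return _mountain_from_structure(left) + [
--         shift + d for d in _mountain_from_structure(right)
--     ]
-- ===== Notes on version B (the rewrite author's own statement) =====
-- stated objective: alternative
-- what changed: Replaces A's left-to-right scan with a mutable depth counter by divide and conquer: solve each half independently and shift the right half's profile by the left half's net bracket balance, exploiting translation invariance of the depth profile.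
import Mathlib
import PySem

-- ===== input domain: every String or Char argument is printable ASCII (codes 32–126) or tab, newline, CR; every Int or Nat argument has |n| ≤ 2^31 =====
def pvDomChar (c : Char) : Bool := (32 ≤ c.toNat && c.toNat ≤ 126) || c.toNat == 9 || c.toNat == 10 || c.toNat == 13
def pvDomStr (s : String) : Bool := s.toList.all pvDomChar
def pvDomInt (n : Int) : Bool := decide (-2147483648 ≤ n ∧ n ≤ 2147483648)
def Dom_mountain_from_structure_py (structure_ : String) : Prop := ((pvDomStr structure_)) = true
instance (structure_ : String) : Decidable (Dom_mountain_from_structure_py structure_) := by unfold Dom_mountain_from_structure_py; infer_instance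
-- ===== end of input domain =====

-- B computes the mountain plot by divide and conquer (solve each half, shift the right
-- half by the left half's net bracket balance) instead of A's left-to-right scan with a
-- mutable depth counter (objective: alternative algorithm).


-- ===== PORT A =====
-- for c in structure: if c=='(': depth+=1; depths.append(depth); if c==')': depth-=1
def mountainLoopA : List Char → Int → List Int
  | [], _ => []
  | c :: cs, depth =>
    let depth1 := if c = '(' then depth + 1 else depth
    let depth2 := if c = ')' then depth1 - 1 else depth1
    depth1 :: mountainLoopA cs depth2

def mountain_from_structure_py (structure_ : String) : List Int :=
  mountainLoopA structure_.toList 0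

-- ===== PORT B =====
-- left.count('(') - left.count(')')
def mountainBalance (l : List Char) : Int :=
  (l.count '(' : Int) - (l.count ')' : Int)

-- divide and conquer on the character list (Source B's recursion on the string halves)
def mountainDC (l : List Char) : List Int :=
  if l.length ≤ 1 then
    match l with
    | [] => []
    | c :: _ => if c = '(' then [1] else [0]
  else
    let mid := l.length / 2
    let left := l.take mid
    let right := l.drop mid
    mountainDC left ++ (mountainDC right).map (fun d => mountainBalance left + d)
termination_by l.length
decreasing_by
  · simp only [List.length_take]; omega
  · simp only [List.length_drop]; omega

def mountain_from_structure_py_alt (structure_ : String) : List Int :=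
  mountainDC structure_.toList

-- ===== PRECONDITION & SPEC =====
def Spec_mountain_from_structure_py (structure_ : String) (out : List Int) : Prop := out = mountain_from_structure_py_alt structure_
instance (structure_ : String) (out : List Int) : Decidable (Spec_mountain_from_structure_py structure_ out) := by unfold Spec_mountain_from_structure_py; infer_instance

-- ===== CLAIM (what is proved, stated in full; the proofs are below) =====
def Claim_equal_mountain_from_structure_py : Prop := ∀ (structure_ : String), Dom_mountain_from_structure_py structure_ → Spec_mountain_from_structure_py structure_ (mountain_from_structure_py structure_)

-- ===== LEMMAS AND PROOFS =====
-- A's loop started at depth d is the loop started at 0, shifted by d.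
theorem mountainLoopA_shift (cs : List Char) : ∀ (d : Int),
    mountainLoopA cs d = (mountainLoopA cs 0).map (fun x => d + x) := by
  induction cs with
  | nil => intro d; rfl
  | cons c cs ih =>
    intro d
    simp only [mountainLoopA, List.map_cons]
    refine List.cons_eq_cons.mpr ⟨by by_cases h : c = '(' <;> simp [h], ?_⟩
    rw [ih, ih (if c = ')' then (if c = '(' then (0:Int) + 1 else 0) - 1
                else (if c = '(' then (0:Int) + 1 else 0)), List.map_map]
    apply List.map_congr_left
    intro x _
    by_cases h1 : c = '(' <;> by_cases h2 : c = ')' <;> simp [h1, h2] <;> omega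

-- A's loop over a concatenation: process the left part, then the right part
-- starting at the left part's net balance.
theorem mountainLoopA_append (l r : List Char) : ∀ (d : Int),
    mountainLoopA (l ++ r) d = mountainLoopA l d ++ mountainLoopA r (d + mountainBalance l) := by
  induction l with
  | nil => intro d; simp [mountainLoopA, mountainBalance]
  | cons c l ih =>
    intro d
    simp only [List.cons_append, mountainLoopA, List.cons_append]
    refine List.cons_eq_cons.mpr ⟨rfl, ?_⟩
    rw [ih]
    congr 1
    simp only [mountainBalance, List.count_cons]
    by_cases h1 : c = '(' <;> by_cases h2 : c = ')' <;> simp [h1, h2] <;>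
      exact congrArg (mountainLoopA r) (by ring)

theorem mountainDC_eq : ∀ (n : Nat) (l : List Char), l.length = n →
    mountainDC l = mountainLoopA l 0 := by
  intro n
  induction n using Nat.strong_induction_on with
  | _ n ih =>
    intro l hl
    rw [mountainDC.eq_def]
    by_cases hle : l.length ≤ 1
    · simp only [hle, if_true]
      match l with
      | [] => rfl
      | [c] => by_cases h : c = '(' <;> simp [mountainLoopA, h]
      | c₁ :: c₂ :: rest => simp at hle
    · simp only [hle, if_false]
      have h2 : 2 ≤ l.length := by omega
      have hta : (l.take (l.length / 2)).length = l.length / 2 := by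
        simp; omega
      have hda : (l.drop (l.length / 2)).length = l.length - l.length / 2 := by simp
      rw [ih (l.length / 2) (by omega) _ hta,
          ih (l.length - l.length / 2) (by omega) _ hda]
      rw [← mountainLoopA_shift]
      have := mountainLoopA_append (l.take (l.length / 2)) (l.drop (l.length / 2)) 0
      rw [List.take_append_drop] at this
      rw [this]
      norm_num

-- ===== VERDICT (by name: the statement is the Claim_ definition above) =====
theorem mountain_from_structure_py_spec : Claim_equal_mountain_from_structure_py := by
  intro s _
  unfold Spec_mountain_from_structure_py mountain_from_structure_py mountain_from_structure_py_alt
  exact (mountainDC_eq _ s.toList rfl).symm
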